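-- pv_equiv track=rewrite | github.com/sksorde/sks_dwp_poc | app.py | route_to_team
-- ===== SOURCE A (Python) =====
-- ROUTING_TABLE = [
--     {"match": {"category": "Benefit Payment Stopped"}, "assign": "income_support_team"},
--     {"match": {"category": "Universal Credit"}, "assign": "uc_team"},
--     {"match": {"category": "Pension"}, "assign": "pension_team"},
--     {"match": {"vulnerability": True}, "assign": "vulnerable_cases_team"},
-- ]
--
-- def route_to_team(category: str, vulnerability: bool) -> str:
--     for rule in ROUTING_TABLE:
--         m = rule.get('match', {})
--         # match all keys present in m
--         ok = True
--         for k, v in m.items():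
--             if k == 'vulnerability':
--                 if bool(v) != bool(vulnerability):
--                     ok = False
--             else:
--                 if v != category:
--                     ok = False
--         if ok:
--             return rule.get('assign')
--     return 'intake_general'
-- ===== SOURCE B (Python) =====
-- def route_to_team(category: str, vulnerability: bool) -> str:
--     if category == 'Benefit Payment Stopped':
--         return 'income_support_team'
--     elif category == 'Universal Credit':
--         return 'uc_team'
--     elif category == 'Pension':
--         return 'pension_team'
--     elif vulnerability:
--         return 'vulnerable_cases_team'
--     else:
--         return 'intake_general'
-- ===== Notes on version B (the rewrite author's own statement) =====
-- stated objective: simpler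
-- what changed: Replaces the data-driven ROUTING_TABLE scan with its inner key-matching loop by a direct if/elif/else chain with the same rule order.
import Mathlib
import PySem

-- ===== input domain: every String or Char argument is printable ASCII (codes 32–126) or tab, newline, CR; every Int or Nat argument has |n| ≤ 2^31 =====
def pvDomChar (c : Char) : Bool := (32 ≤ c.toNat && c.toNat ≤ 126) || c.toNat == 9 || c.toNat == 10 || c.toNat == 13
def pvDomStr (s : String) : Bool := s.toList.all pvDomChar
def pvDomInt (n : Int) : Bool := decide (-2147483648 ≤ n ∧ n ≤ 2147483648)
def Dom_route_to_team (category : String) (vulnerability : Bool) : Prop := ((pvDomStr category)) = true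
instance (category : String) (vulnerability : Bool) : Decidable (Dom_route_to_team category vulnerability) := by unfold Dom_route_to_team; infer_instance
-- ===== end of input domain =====

-- B replaces A's data-driven ROUTING_TABLE scan (with its inner key-matching loop)
-- by a direct if/elif/else chain in the same rule order; objective: simpler.

-- ===== PORT A =====
-- a match value in the table: a string (for the 'category' key) or a bool (for 'vulnerability')
inductive MVal
  | s : String → MVal
  | b : Bool → MVal
deriving DecidableEq, Repr

-- Python truthiness bool(v) for the table's match values
def mvalTruthy : MVal → Bool
  | MVal.s x => x ≠ ""
  | MVal.b x => x

-- ROUTING_TABLE: each rule is (its 'match' dict as an association list, its 'assign' string)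
def pyROUTING_TABLE : List (List (String × MVal) × String) :=
  [ ([("category", MVal.s "Benefit Payment Stopped")], "income_support_team")
  , ([("category", MVal.s "Universal Credit")], "uc_team")
  , ([("category", MVal.s "Pension")], "pension_team")
  , ([("vulnerability", MVal.b true)], "vulnerable_cases_team") ]

-- inner loop: for k, v in m.items(): … (accumulator ok)
def matchLoop (category : String) (vulnerability : Bool) (m : List (String × MVal)) : Bool :=
  m.foldl (fun ok kv =>
    if kv.1 == "vulnerability" then
      if mvalTruthy kv.2 != vulnerability then false else ok
    else
      if kv.2 != MVal.s category then false else ok) true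

-- outer loop: for rule in ROUTING_TABLE: … return on first ok
def routeLoop (category : String) (vulnerability : Bool) : List (List (String × MVal) × String) → String
  | [] => "intake_general"
  | rule :: rest =>
    if matchLoop category vulnerability rule.1 then rule.2
    else routeLoop category vulnerability rest

def route_to_team (category : String) (vulnerability : Bool) : String :=
  routeLoop category vulnerability pyROUTING_TABLE

-- ===== PORT B =====
def route_to_team_alt (category : String) (vulnerability : Bool) : String :=
  if category = "Benefit Payment Stopped" then "income_support_team"
  else if category = "Universal Credit" then "uc_team"
  else if category = "Pension" then "pension_team"
  else if vulnerability then "vulnerable_cases_team"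
  else "intake_general"

-- ===== PRECONDITION & SPEC =====
def Spec_route_to_team (category : String) (vulnerability : Bool) (out : String) : Prop := out = route_to_team_alt category vulnerability
instance (category : String) (vulnerability : Bool) (out : String) : Decidable (Spec_route_to_team category vulnerability out) := by unfold Spec_route_to_team; infer_instance

-- ===== CLAIM (what is proved, stated in full; the proofs are below) =====
def Claim_equal_route_to_team : Prop := ∀ (category : String) (vulnerability : Bool), Dom_route_to_team category vulnerability → Spec_route_to_team category vulnerability (route_to_team category vulnerability)

-- ===== LEMMAS AND PROOFS =====

-- ===== VERDICT (by name: the statement is the Claim_ definition above) =====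
theorem route_to_team_spec : Claim_equal_route_to_team := by
  intro category vulnerability _
  unfold Spec_route_to_team route_to_team route_to_team_alt
  by_cases h1 : category = "Benefit Payment Stopped"
  · subst h1; cases vulnerability <;> decide
  by_cases h2 : category = "Universal Credit"
  · subst h2; cases vulnerability <;> decide
  by_cases h3 : category = "Pension"
  · subst h3; cases vulnerability <;> decide
  cases vulnerability <;>
    simp [pyROUTING_TABLE, routeLoop, matchLoop, mvalTruthy,
      h1, h2, h3, Ne.symm h1, Ne.symm h2, Ne.symm h3]
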